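-- pv_equiv track=rewrite | github.com/jfm-code/mi-codesignal | optimization_practice/minimal_block.py | minimal_block
-- ===== SOURCE A (Python) =====
-- def minimal_block(arr):
--     max_block_len = {}
--     last_occurence = {}
--
--     # calculate the maximum of the block from the beginning/last occured number to the current number
--     for i, num in enumerate(arr):
--         if num not in max_block_len:
--             max_block_len[num] = i
--         else:
--             cur_block_len = i - last_occurence[num] - 1
--             max_block_len[num] = max(max_block_len[num], cur_block_len)
--         # update the index of the last occured number at the end (not at the beginning)
--         last_occurence[num] = i
--
--     # don't forget the length of the block from the last occured number to the end of the array
--     for num, last_i in last_occurence.items():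
--         tail_block_len = len(arr) - last_i - 1
--         max_block_len[num] = max(max_block_len[num], tail_block_len)
--
--     num_with_min_len_block = min(max_block_len, key=max_block_len.get) # return the key instead of value
--     return num_with_min_len_block
-- ===== SOURCE B (Python) =====
-- def minimal_block(arr):
--     # Group: value -> list of indices (built in one forward scan, first-occurrence order).
--     positions = {}
--     for i, num in enumerate(arr):
--         positions.setdefault(num, []).append(i)
--     # Per value, the largest block is the largest gap between consecutive
--     # occurrences, padded with -1 in front and len(arr) at the end.
--     blocks = {}
--     for num, idxs in positions.items():
--         best, prev = 0, -1
--         for i in idxs: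
--             best = max(best, i - prev - 1)
--             prev = i
--         blocks[num] = max(best, len(arr) - prev - 1)
--     return min(blocks, key=blocks.get)
-- ===== Notes on version B (the rewrite author's own statement) =====
-- stated objective: alternative
-- what changed: A interleaves gap tracking and last-occurrence bookkeeping in one scan over two dicts plus a tail-fixup loop; B first groups each value's positions into one dict during a single scan and then computes each value's largest block from its position list in a separate pass, keeping the same first-occurrence tie-break order.
-- outside the precondition, e.g. on minimal_block([]): A raises ValueError, B raises ValueError
import Mathlib
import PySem

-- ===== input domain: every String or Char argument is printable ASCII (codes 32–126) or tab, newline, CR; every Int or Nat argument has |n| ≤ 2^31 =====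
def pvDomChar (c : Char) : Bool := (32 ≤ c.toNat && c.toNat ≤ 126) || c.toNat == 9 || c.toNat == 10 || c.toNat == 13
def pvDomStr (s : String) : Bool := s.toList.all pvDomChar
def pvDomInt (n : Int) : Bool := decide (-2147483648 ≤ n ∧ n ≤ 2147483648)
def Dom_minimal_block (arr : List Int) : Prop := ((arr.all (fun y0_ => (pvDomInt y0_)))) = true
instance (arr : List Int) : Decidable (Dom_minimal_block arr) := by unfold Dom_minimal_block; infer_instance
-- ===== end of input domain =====

-- B replaces A's incremental two-dict scan by a group-by-positions dict plus a per-value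
-- gap fold (objective: alternative decomposition; same insertion/tie-break order).

-- ===== PORT A =====
-- literal port of A: one fold over enumerate(arr) carrying (max_block_len, last_occurence),
-- then the tail-block loop over last_occurence.items, then min(dict, key=dict.get).
-- Python's max_block_len[num] / last_occurence[num] are looked up only when present, so getD is exact there.
def minimal_block (arr : List Int) : Int :=
  let st := (PySem.List.enumerate arr 0).foldl
    (fun (st : PySem.Dict Int Int × PySem.Dict Int Int) p =>
      let mbl := st.1
      let lastOcc := st.2
      let mbl' := if mbl.contains p.2 = false then mbl.insert p.2 p.1
        else mbl.insert p.2 (max (mbl.getD p.2 0) (p.1 - lastOcc.getD p.2 0 - 1))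
      (mbl', lastOcc.insert p.2 p.1))
    (PySem.Dict.empty, PySem.Dict.empty)
  let maxBlockLen := st.2.items.foldl
    (fun (d : PySem.Dict Int Int) q =>
      d.insert q.1 (max (d.getD q.1 0) ((arr.length : Int) - q.2 - 1)))
    st.1
  match PySem.List.min? maxBlockLen.keys (fun k => maxBlockLen.getD k 0) with
  | some k => k
  | none => 0   -- arr = []: Python's min([]) raises ValueError; excluded by Pre_

-- ===== PORT B =====
-- literal port of Source B: positions dict (setdefault+append = modify with [] default),
-- then per value the (best, prev) gap fold, then min(dict, key=dict.get).
def minimal_block_alt (arr : List Int) : Int :=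
  let positions := (PySem.List.enumerate arr 0).foldl
    (fun (d : PySem.Dict Int (List Int)) p => d.modify p.2 [] (· ++ [p.1]))
    PySem.Dict.empty
  let blocks := positions.items.foldl
    (fun (d : PySem.Dict Int Int) q =>
      let st := q.2.foldl (fun (st : Int × Int) i => (max st.1 (i - st.2 - 1), i)) (0, -1)
      d.insert q.1 (max st.1 ((arr.length : Int) - st.2 - 1)))
    PySem.Dict.empty
  match PySem.List.min? blocks.keys (fun k => blocks.getD k 0) with
  | some k => k
  | none => 0   -- arr = []: Python's min([]) raises ValueError; excluded by Pre_

-- ===== PRECONDITION & SPEC =====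
-- On arr = [] both Pythons raise ValueError (min of an empty dict); that is the only exclusion.
def Pre_minimal_block (arr : List Int) : Prop := arr ≠ []
instance (arr : List Int) : Decidable (Pre_minimal_block arr) := by unfold Pre_minimal_block; infer_instance
def pvWitness_minimal_block : List Int := ([1])

def Spec_minimal_block (arr : List Int) (out : Int) : Prop := out = minimal_block_alt arr
instance (arr : List Int) (out : Int) : Decidable (Spec_minimal_block arr out) := by unfold Spec_minimal_block; infer_instance

-- ===== CLAIM (what is proved, stated in full; the proofs are below) =====
def Claim_equal_minimal_block : Prop := ∀ (arr : List Int), Dom_minimal_block arr → Pre_minimal_block arr → Spec_minimal_block arr (minimal_block arr)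

-- ===== LEMMAS AND PROOFS =====

def pvGL (l : List Int) : Int × Int :=
  l.foldl (fun st i => (max st.1 (i - st.2 - 1), i)) (0, -1)

def pvIdxs (arr : List Int) (v : Int) : List Int :=
  ((PySem.List.enumerate arr 0).filter (fun p => p.2 == v)).map (·.1)

def pvAfold (arr : List Int) : PySem.Dict Int Int × PySem.Dict Int Int :=
  (PySem.List.enumerate arr 0).foldl
    (fun (st : PySem.Dict Int Int × PySem.Dict Int Int) p =>
      (if st.1.contains p.2 = false then st.1.insert p.2 p.1
       else st.1.insert p.2 (max (st.1.getD p.2 0) (p.1 - st.2.getD p.2 0 - 1)),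
       st.2.insert p.2 p.1))
    (PySem.Dict.empty, PySem.Dict.empty)

theorem pvIdxs_append (arr : List Int) (x v : Int) :
    pvIdxs (arr ++ [x]) v = pvIdxs arr v ++ (if x = v then [(arr.length : Int)] else []) := by
  simp [pvIdxs, PySem.List.enumerate_append, PySem.List.enumerate_cons, PySem.List.enumerate_nil,
    List.filter_append]
  split_ifs with h <;> simp [h]

theorem pvIdxs_nil_of_not_mem (arr : List Int) (v : Int) (hv : v ∉ arr) : pvIdxs arr v = [] := by
  simp [pvIdxs, List.filter_eq_nil_iff]
  intro a b hmem heq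
  exact hv (heq ▸ (by simpa using (PySem.List.map_snd_enumerate arr 0) ▸ List.mem_map_of_mem hmem))

theorem pvGL_append_singleton (l : List Int) (n : Int) :
    pvGL (l ++ [n]) = (max (pvGL l).1 (n - (pvGL l).2 - 1), n) := by
  simp [pvGL, List.foldl_append]

theorem pvAfold_append (arr : List Int) (x : Int) :
    pvAfold (arr ++ [x]) =
      ((if (pvAfold arr).1.contains x = false then (pvAfold arr).1.insert x (arr.length : Int)
        else (pvAfold arr).1.insert x (max ((pvAfold arr).1.getD x 0) ((arr.length : Int) - (pvAfold arr).2.getD x 0 - 1)),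
        (pvAfold arr).2.insert x (arr.length : Int))) := by
  simp [pvAfold, PySem.List.enumerate_append, PySem.List.enumerate_cons, PySem.List.enumerate_nil,
    List.foldl_append]

theorem contains_eq_of_keys_ofList (d : PySem.Dict Int Int) (arr : List Int) (x : Int)
    (hk : d.keys = PySem.Set.ofList arr) : d.contains x = decide (x ∈ arr) := by
  have hiff : d.contains x = true ↔ x ∈ arr := by
    rw [PySem.Dict.contains_iff_mem_keys d x, hk, PySem.Set.mem_ofList]
  by_cases hx : x ∈ arr
  · simp [hx, hiff.2 hx]
  · simp only [hx, decide_false]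
    rcases Bool.eq_false_or_eq_true (d.contains x) with h | h
    · exact absurd (hiff.1 h) hx
    · exact h

theorem pvAfold_inv (arr : List Int) :
    (pvAfold arr).1.keys = PySem.Set.ofList arr ∧
    (pvAfold arr).2.keys = PySem.Set.ofList arr ∧
    ∀ v ∈ arr, (pvAfold arr).1.getD v 0 = (pvGL (pvIdxs arr v)).1 ∧
               (pvAfold arr).2.getD v 0 = (pvGL (pvIdxs arr v)).2 := by
  induction arr using List.reverseRecOn with
  | nil => simp [pvAfold, PySem.List.enumerate_nil, PySem.Dict.keys_empty, PySem.Set.ofList_nil]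
  | append_singleton arr x ih =>
    obtain ⟨hk1, hk2, hval⟩ := ih
    rw [pvAfold_append]
    have hc1 := contains_eq_of_keys_ofList _ arr x hk1
    have hc2 := contains_eq_of_keys_ofList _ arr x hk2
    have hkeys : ∀ (d : PySem.Dict Int Int), d.keys = PySem.Set.ofList arr →
        (d.insert x (arr.length : Int)).keys = PySem.Set.ofList (arr ++ [x]) := by
      intro d hd
      by_cases hx : x ∈ arr
      · rw [PySem.Dict.keys_insert_of_contains d _ (by rw [contains_eq_of_keys_ofList d arr x hd]; simp [hx]),
          hd, PySem.Set.ofList_append_singleton, PySem.Set.add_of_mem (by simp [PySem.Set.mem_ofList, hx])]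
      · rw [PySem.Dict.keys_insert_of_not_contains d _ (by rw [contains_eq_of_keys_ofList d arr x hd]; simp [hx]),
          hd, PySem.Set.ofList_append_singleton, PySem.Set.add_of_not_mem (by simp [PySem.Set.mem_ofList, hx])]
    by_cases hx : x ∈ arr
    · rw [hc1]; simp only [hx, decide_true, Bool.true_eq_false, if_false]
      refine ⟨?_, hkeys _ hk2, ?_⟩
      · have : ((pvAfold arr).1.insert x (max ((pvAfold arr).1.getD x 0) ((arr.length : Int) - (pvAfold arr).2.getD x 0 - 1))).keys = (pvAfold arr).1.keys :=
          PySem.Dict.keys_insert_of_contains _ _ (by rw [hc1]; simp [hx])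
        rw [this, hk1, PySem.Set.ofList_append_singleton, PySem.Set.add_of_mem (by simp [PySem.Set.mem_ofList, hx])]
      · intro v hv
        rw [pvIdxs_append]
        by_cases hvx : v = x
        · subst hvx
          obtain ⟨h1, h2⟩ := hval v hx
          simp [pvGL_append_singleton, h1, h2]
        · have hv' : v ∈ arr := by
            rcases List.mem_append.1 hv with h | h
            · exact h
            · simp at h; exact absurd h hvx
          obtain ⟨h1, h2⟩ := hval v hv'
          have hxv : ¬ x = v := fun h => hvx h.symm
          simp [PySem.Dict.getD_insert, hvx, hxv, h1, h2]
    · rw [hc1]; simp only [hx, decide_false]; simp only [if_true]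
      refine ⟨hkeys _ hk1, hkeys _ hk2, ?_⟩
      intro v hv
      rw [pvIdxs_append]
      by_cases hvx : v = x
      · subst hvx
        rw [pvIdxs_nil_of_not_mem arr v hx]
        simp [pvGL]
      · have hv' : v ∈ arr := by
          rcases List.mem_append.1 hv with h | h
          · exact h
          · simp at h; exact absurd h hvx
        obtain ⟨h1, h2⟩ := hval v hv'
        have hxv : ¬ x = v := fun h => hvx h.symm
        simp [PySem.Dict.getD_insert, hvx, hxv, h1, h2]

def pvAmbl (arr : List Int) : PySem.Dict Int Int :=
  (pvAfold arr).2.items.foldl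
    (fun (d : PySem.Dict Int Int) q =>
      d.insert q.1 (max (d.getD q.1 0) ((arr.length : Int) - q.2 - 1)))
    (pvAfold arr).1

theorem foldl_insert_getD_not_mem (f : Int → Int → Int) (l : List (Int × Int)) :
    ∀ (d : PySem.Dict Int Int) (k : Int), k ∉ l.map (·.1) →
      (l.foldl (fun d q => d.insert q.1 (f (d.getD q.1 0) q.2)) d).getD k 0 = d.getD k 0 := by
  induction l with
  | nil => intro d k _; rfl
  | cons q t ih =>
    intro d k hk
    simp only [List.map_cons, List.mem_cons, not_or] at hk
    simp only [List.foldl_cons]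
    rw [ih _ k hk.2, PySem.Dict.getD_insert_of_ne _ _ _ hk.1]

theorem foldl_insert_getD_mem (f : Int → Int → Int) (l : List (Int × Int)) :
    ∀ (d : PySem.Dict Int Int) (k w : Int), (l.map (·.1)).Nodup → (k, w) ∈ l →
      (l.foldl (fun d q => d.insert q.1 (f (d.getD q.1 0) q.2)) d).getD k 0 = f (d.getD k 0) w := by
  induction l with
  | nil => intro d k w _ h; simp at h
  | cons q t ih =>
    intro d k w hnd hmem
    simp only [List.map_cons, List.nodup_cons] at hnd
    simp only [List.foldl_cons]
    rcases List.mem_cons.1 hmem with h | h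
    · subst h
      rw [foldl_insert_getD_not_mem f t _ k hnd.1, PySem.Dict.getD_insert_self]
    · have hne : q.1 ≠ k := by
        intro he
        exact hnd.1 (he ▸ List.mem_map_of_mem h)
      rw [ih _ k w hnd.2 h, PySem.Dict.getD_insert_of_ne _ _ _ (Ne.symm hne)]

theorem pvAmbl_keys (arr : List Int) : (pvAmbl arr).keys = PySem.Set.ofList arr := by
  obtain ⟨hk1, hk2, _⟩ := pvAfold_inv arr
  unfold pvAmbl
  have hkk := PySem.Dict.keys_foldl_insert_key (pvAfold arr).2.items (fun q => q.1)
    (fun d q => max (d.getD q.1 0) ((arr.length : Int) - q.2 - 1)) (pvAfold arr).1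
  simp only at hkk
  rw [hkk, hk1]
  have : (pvAfold arr).2.items.map (·.1) = PySem.Set.ofList arr := by
    have := hk2; simpa [PySem.Dict.keys] using this
  rw [this, PySem.Set.update_eq_append_filter, PySem.Set.ofList_ofList]
  have : (PySem.Set.ofList arr).filter (fun y => !(PySem.Set.ofList arr : PySem.Set Int).contains y) = [] := by
    rw [List.filter_eq_nil_iff]
    intro a ha
    simpa [PySem.Set.contains_eq_listContains] using ha
  rw [this, List.append_nil]

theorem pvAmbl_getD (arr : List Int) (v : Int) (hv : v ∈ arr) :
    (pvAmbl arr).getD v 0 =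
      max ((pvGL (pvIdxs arr v)).1) ((arr.length : Int) - (pvGL (pvIdxs arr v)).2 - 1) := by
  obtain ⟨hk1, hk2, hval⟩ := pvAfold_inv arr
  obtain ⟨h1, h2⟩ := hval v hv
  have hnd : (pvAfold arr).2.keys.Nodup := by rw [hk2]; exact PySem.Set.nodup_ofList arr
  have hvk : v ∈ (pvAfold arr).2.keys := by rw [hk2]; exact (PySem.Set.mem_ofList _ _).2 hv
  have hfst : (pvAfold arr).2.items.map (·.1) = (pvAfold arr).2.keys := rfl
  obtain ⟨p, hp, hp1⟩ := List.mem_map.1 (hfst ▸ hvk)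
  obtain ⟨w, hw⟩ : ∃ w, (v, w) ∈ (pvAfold arr).2.items := ⟨p.2, by rwa [show (v, p.2) = p from by ext <;> simp [hp1]]⟩
  have hwval : (pvAfold arr).2.getD v 0 = w := PySem.Dict.getD_of_mem_items _ hw hnd 0
  unfold pvAmbl
  rw [foldl_insert_getD_mem (fun a b => max a ((arr.length : Int) - b - 1)) _ _ v w (hfst ▸ hnd) hw,
    h1, ← hwval, h2]

def pvBpos (arr : List Int) : PySem.Dict Int (List Int) :=
  (PySem.List.enumerate arr 0).foldl
    (fun (d : PySem.Dict Int (List Int)) p => d.modify p.2 [] (· ++ [p.1]))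
    PySem.Dict.empty

def pvBblocks (arr : List Int) : PySem.Dict Int Int :=
  (pvBpos arr).items.foldl
    (fun (d : PySem.Dict Int Int) q =>
      d.insert q.1 (max (pvGL q.2).1 ((arr.length : Int) - (pvGL q.2).2 - 1)))
    PySem.Dict.empty

theorem pvBpos_keys (arr : List Int) : (pvBpos arr).keys = PySem.Set.ofList arr := by
  have h := PySem.Dict.keys_foldl_modify_key (PySem.List.enumerate arr 0) (fun p => p.2) []
    (fun _ p => (· ++ [p.1])) (PySem.Dict.empty : PySem.Dict Int (List Int))
  simp only at h
  unfold pvBpos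
  rw [h, PySem.Dict.keys_empty, PySem.Set.update_nil_left, PySem.List.map_snd_enumerate]

theorem pvBpos_getD (arr : List Int) (v : Int) : (pvBpos arr).getD v [] = pvIdxs arr v := by
  unfold pvBpos pvIdxs
  rw [show (PySem.List.enumerate arr 0).foldl
      (fun (d : PySem.Dict Int (List Int)) p => d.modify p.2 [] (· ++ [p.1])) PySem.Dict.empty
    = ((PySem.List.enumerate arr 0).map Prod.swap).foldl
      (fun (d : PySem.Dict Int (List Int)) p => d.modify p.1 [] (· ++ [p.2])) PySem.Dict.empty from
    (List.foldl_map (f := Prod.swap) (g := fun (d : PySem.Dict Int (List Int)) p => d.modify p.1 [] (· ++ [p.2])) (l := PySem.List.enumerate arr 0) (init := PySem.Dict.empty)).symm]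
  rw [PySem.Dict.getD_foldl_modify_append, PySem.Dict.getD_empty, List.nil_append,
    List.filter_map, List.map_map]
  simp [Function.comp_def, Prod.swap]

theorem pvBblocks_items (arr : List Int) :
    (pvBblocks arr).items = (pvBpos arr).items.map
      (fun q => (q.1, max (pvGL q.2).1 ((arr.length : Int) - (pvGL q.2).2 - 1))) := by
  unfold pvBblocks
  have h := PySem.Dict.items_foldl_insert_fresh (pvBpos arr).items (fun q => q.1)
    (fun q => max (pvGL q.2).1 ((arr.length : Int) - (pvGL q.2).2 - 1))
    (PySem.Dict.empty : PySem.Dict Int Int)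
    (fun a _ => PySem.Dict.contains_empty (ν := Int) a.1)
    (by
      have : (pvBpos arr).items.map (fun q => q.1) = (pvBpos arr).keys := rfl
      rw [this, pvBpos_keys]; exact PySem.Set.nodup_ofList arr)
  simp only at h
  simpa using h

theorem pvBblocks_keys (arr : List Int) : (pvBblocks arr).keys = PySem.Set.ofList arr := by
  have : (pvBblocks arr).keys = (pvBblocks arr).items.map (·.1) := rfl
  rw [this, pvBblocks_items, List.map_map]
  have : (pvBpos arr).items.map ((·.1) ∘ (fun q : Int × List Int =>
      (q.1, max (pvGL q.2).1 ((arr.length : Int) - (pvGL q.2).2 - 1)))) = (pvBpos arr).keys := rfl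
  rw [this, pvBpos_keys]

theorem pvBblocks_getD (arr : List Int) (v : Int) (hv : v ∈ arr) :
    (pvBblocks arr).getD v 0 =
      max ((pvGL (pvIdxs arr v)).1) ((arr.length : Int) - (pvGL (pvIdxs arr v)).2 - 1) := by
  have hnd : (pvBpos arr).keys.Nodup := by rw [pvBpos_keys]; exact PySem.Set.nodup_ofList arr
  have hvk : v ∈ (pvBpos arr).keys := by rw [pvBpos_keys]; exact (PySem.Set.mem_ofList _ _).2 hv
  have hfst : (pvBpos arr).items.map (·.1) = (pvBpos arr).keys := rfl
  obtain ⟨p, hp, hp1⟩ := List.mem_map.1 (hfst ▸ hvk)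
  have hpair : (v, p.2) ∈ (pvBpos arr).items := by rwa [show (v, p.2) = p from by ext <;> simp [hp1]]
  have hw : (pvBpos arr).getD v [] = p.2 := PySem.Dict.getD_of_mem_items _ hpair hnd []
  have hmem2 : (v, max (pvGL p.2).1 ((arr.length : Int) - (pvGL p.2).2 - 1)) ∈ (pvBblocks arr).items := by
    rw [pvBblocks_items]
    exact List.mem_map.2 ⟨(v, p.2), hpair, rfl⟩
  have hnd2 : (pvBblocks arr).keys.Nodup := by rw [pvBblocks_keys]; exact PySem.Set.nodup_ofList arr
  rw [PySem.Dict.getD_of_mem_items _ hmem2 hnd2 0, ← hw, pvBpos_getD]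

theorem pv_dicts_eq (arr : List Int) : pvAmbl arr = pvBblocks arr := by
  apply PySem.Dict.ext
  have hndA : (pvAmbl arr).keys.Nodup := by rw [pvAmbl_keys]; exact PySem.Set.nodup_ofList arr
  have hndB : (pvBblocks arr).keys.Nodup := by rw [pvBblocks_keys]; exact PySem.Set.nodup_ofList arr
  rw [PySem.Dict.items_eq_map_keys _ hndA 0, PySem.Dict.items_eq_map_keys _ hndB 0,
    pvAmbl_keys, pvBblocks_keys]
  apply List.map_congr_left
  intro k hk
  have hkarr : k ∈ arr := (PySem.Set.mem_ofList _ _).1 hk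
  rw [pvAmbl_getD arr k hkarr, pvBblocks_getD arr k hkarr]

theorem pvA_eq (arr : List Int) :
    minimal_block arr = match PySem.List.min? (pvAmbl arr).keys (fun k => (pvAmbl arr).getD k 0) with
      | some k => k | none => 0 := rfl

theorem pvB_eq (arr : List Int) :
    minimal_block_alt arr = match PySem.List.min? (pvBblocks arr).keys (fun k => (pvBblocks arr).getD k 0) with
      | some k => k | none => 0 := rfl

theorem pv_ports_agree (arr : List Int) : minimal_block arr = minimal_block_alt arr := by
  rw [pvA_eq, pvB_eq, pv_dicts_eq]

-- ===== VERDICT (by name: the statement is the Claim_ definition above) =====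
theorem minimal_block_spec : Claim_equal_minimal_block := by
  intro arr _ _
  unfold Spec_minimal_block
  exact pv_ports_agree arr
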